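-- pv_equiv track=rewrite | github.com/Ella-Hoeppner/CTP_Theory | extract.py | tuple_int_translator
-- ===== SOURCE A (Python) =====
-- def tuple_int_translator(tuples):
--   """Given a set of tuples, this function creates a dictionary that maps each unique tuple to a unique integer, starting from 1.
--
--   Args:
--     tuples (list): A list of tuples for which a translator will be created.
--
--   Returns:
--     A dictionary containing each unique tuple in "tuples" as a key. Each unique "tuple" in tuples is mapped to a unique integer.
--   """
--   currentIndex=0
--   d={}
--   for t in tuples:
--     if t not in d.keys():
--       d[t]=currentIndex
--       currentIndex+=1
--   return d
-- ===== SOURCE B (Python) =====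
-- def tuple_int_translator(tuples):
--   uniq = sorted(set(tuples), key=tuples.index)
--   return dict(zip(uniq, range(len(uniq))))
-- ===== Notes on version B (the rewrite author's own statement) =====
-- stated objective: alternative
-- what changed: Replaces A's single guarded pass with a running counter by a sort-based algorithm: deduplicate with set(), sort the unique tuples by their first-occurrence position (tuples.index), and pair them with range(len(uniq)); correct because first-occurrence positions are distinct and sorting by them recovers first-occurrence order.
import Mathlib
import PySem

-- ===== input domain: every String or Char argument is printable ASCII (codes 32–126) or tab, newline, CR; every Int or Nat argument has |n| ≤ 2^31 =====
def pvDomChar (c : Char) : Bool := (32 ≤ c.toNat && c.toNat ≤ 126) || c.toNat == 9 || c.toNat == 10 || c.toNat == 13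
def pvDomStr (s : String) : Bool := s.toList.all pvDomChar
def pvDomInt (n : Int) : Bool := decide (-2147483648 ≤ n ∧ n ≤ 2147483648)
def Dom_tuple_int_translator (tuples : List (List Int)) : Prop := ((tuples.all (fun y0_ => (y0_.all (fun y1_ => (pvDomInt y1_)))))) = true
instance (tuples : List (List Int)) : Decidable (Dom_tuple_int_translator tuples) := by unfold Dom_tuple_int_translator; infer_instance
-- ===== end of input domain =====

-- B is a sort-based alternative (dedupe with set(), sort unique tuples by first-occurrence position, pair with range); same result, no speed claim.

-- ===== PORT A =====
-- loop: for t in tuples: if t not in d.keys(): d[t]=currentIndex; currentIndex+=1  — returns the dict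
def tuple_int_translator (tuples : List (List Int)) : List (List Int × Int) :=
  (tuples.foldl
    (fun (st : Int × PySem.Dict (List Int) Int) t =>
      if st.2.contains t then st else (st.1 + 1, st.2.insert t st.1))
    (0, PySem.Dict.empty)).2.items

-- ===== PORT B =====
-- uniq = sorted(set(tuples), key=tuples.index); return dict(zip(uniq, range(len(uniq))))
-- (the sort key tuples.index is injective on set(tuples), so the result does not depend on set iteration order)
def tuple_int_translator_alt (tuples : List (List Int)) : List (List Int × Int) :=
  let uniq := PySem.List.sorted (PySem.Set.ofList tuples)
      (fun t => (PySem.List.index? tuples t).getD 0) false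
  uniq.zip (PySem.List.pyRange 0 (uniq.length : Int) 1)

-- ===== PRECONDITION & SPEC =====
def Spec_tuple_int_translator (tuples : List (List Int)) (out : List (List Int × Int)) : Prop := out = tuple_int_translator_alt tuples
instance (tuples : List (List Int)) (out : List (List Int × Int)) : Decidable (Spec_tuple_int_translator tuples out) := by unfold Spec_tuple_int_translator; infer_instance

-- ===== CLAIM (what is proved, stated in full; the proofs are below) =====
def Claim_equal_tuple_int_translator : Prop := ∀ (tuples : List (List Int)), Dom_tuple_int_translator tuples → Spec_tuple_int_translator tuples (tuple_int_translator tuples)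

-- ===== LEMMAS AND PROOFS =====

-- the elements of xs not already in `seen`, first occurrences in order
def pvFresh (seen : List (List Int)) : List (List Int) → List (List Int)
  | [] => []
  | x :: xs => if x ∈ seen then pvFresh seen xs else x :: pvFresh (seen ++ [x]) xs

theorem pvFresh_nil_eq_dedup (xs : List (List Int)) :
    ∀ seen : List (List Int), seen ++ pvFresh seen xs = xs.foldl PySem.Set.add seen := by
  induction xs with
  | nil => intro seen; simp [pvFresh]
  | cons x xs ih =>
    intro seen
    by_cases h : x ∈ seen
    · simp [pvFresh, List.foldl_cons, PySem.Set.add, h, ih]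
    · simp only [pvFresh, if_neg h, List.foldl_cons]
      rw [show PySem.Set.add seen x = seen ++ [x] from by simp [PySem.Set.add, h],
          ← ih (seen ++ [x])]
      simp

theorem pvMem_pvFresh {a : List Int} (xs : List (List Int)) :
    ∀ seen, a ∈ pvFresh seen xs → a ∈ xs ∧ a ∉ seen := by
  induction xs with
  | nil => intro seen h; simp [pvFresh] at h
  | cons x xs ih =>
    intro seen h
    by_cases hx : x ∈ seen
    · simp only [pvFresh, if_pos hx] at h
      have := ih seen h
      exact ⟨List.mem_cons_of_mem _ this.1, this.2⟩
    · simp only [pvFresh, if_neg hx] at h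
      rcases List.mem_cons.mp h with h | h
      · exact ⟨by simp [h], by simpa [h] using hx⟩
      · have := ih (seen ++ [x]) h
        refine ⟨List.mem_cons_of_mem _ this.1, fun hs => this.2 (by simp [hs])⟩

-- in pvFresh seen xs, elements appear in order of first occurrence in xs
theorem pvFresh_pairwise_idxOf (xs : List (List Int)) :
    ∀ seen, (pvFresh seen xs).Pairwise (fun a b => xs.idxOf a < xs.idxOf b) := by
  induction xs with
  | nil => intro seen; simp [pvFresh]
  | cons x xs ih =>
    intro seen
    by_cases hx : x ∈ seen
    · simp only [pvFresh, if_pos hx]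
      refine ((ih seen).imp_of_mem ?_)
      intro a b ha hb hab
      have hna : a ≠ x := fun h => (pvMem_pvFresh xs seen ha).2 (h ▸ hx)
      have hnb : b ≠ x := fun h => (pvMem_pvFresh xs seen hb).2 (h ▸ hx)
      simpa [List.idxOf_cons, hna.symm, hnb.symm, beq_iff_eq] using Nat.succ_lt_succ hab
    · simp only [pvFresh, if_neg hx]
      refine List.Pairwise.cons ?_ (((ih (seen ++ [x]))).imp_of_mem ?_)
      · intro b hb
        have hnb : b ≠ x := fun h =>
          (pvMem_pvFresh xs (seen ++ [x]) hb).2 (by simp [h])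
        simp [hnb.symm]
      · intro a b ha hb hab
        have hna : a ≠ x := fun h =>
          (pvMem_pvFresh xs (seen ++ [x]) ha).2 (by simp [h])
        have hnb : b ≠ x := fun h =>
          (pvMem_pvFresh xs (seen ++ [x]) hb).2 (by simp [h])
        simpa [List.idxOf_cons, hna.symm, hnb.symm, beq_iff_eq] using Nat.succ_lt_succ hab

theorem pvLoop_items (xs : List (List Int)) :
    ∀ (d : PySem.Dict (List Int) Int) (n : Int), d.keys.Nodup →
    (xs.foldl
      (fun (st : Int × PySem.Dict (List Int) Int) t =>
        if st.2.contains t then st else (st.1 + 1, st.2.insert t st.1))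
      (n, d)).2.items
      = d.items ++ (PySem.List.enumerate (pvFresh d.keys xs) n).map (fun p => (p.2, p.1)) := by
  induction xs with
  | nil => intro d n _; simp [pvFresh]
  | cons x xs ih =>
    intro d n hnd
    by_cases h : x ∈ d.keys
    · have hc : d.contains x = true := by
        rw [PySem.Dict.contains_iff_mem_keys]; exact h
      simp [List.foldl_cons, hc, pvFresh, h, ih d n hnd]
    · have hc : d.contains x = false := by
        rw [← Bool.not_eq_true, PySem.Dict.contains_iff_mem_keys]; exact h
      simp only [List.foldl_cons, hc, Bool.false_eq_true, if_false, pvFresh, if_neg h]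
      rw [ih (d.insert x n) (n + 1) (PySem.Dict.nodup_keys_insert d x n hnd)]
      rw [PySem.Dict.keys_insert_of_not_contains d n hc,
          PySem.Dict.items_insert_of_not_contains d n hc]
      simp [PySem.List.enumerate]

-- zip with range(s, s+len) is enumerate with the pair swapped
theorem pvZip_range_eq_enumerate (xs : List (List Int)) :
    ∀ s : Int, xs.zip (PySem.List.pyRange s (s + (xs.length : Int)) 1)
      = (PySem.List.enumerate xs s).map (fun p => (p.2, p.1)) := by
  induction xs with
  | nil => intro s; simp [PySem.List.enumerate_nil]
  | cons x xs ih =>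
    intro s
    rw [PySem.List.pyRange_one_cons (by simp only [List.length_cons]; push_cast; omega)]
    simp only [PySem.List.enumerate_cons, List.zip_cons_cons, List.map_cons]
    rw [show s + ((x :: xs).length : Int) = (s + 1) + (xs.length : Int) by
          simp only [List.length_cons]; push_cast; omega,
        ih (s + 1)]

theorem pvIdxOf?_eq_some (a : List Int) (xs : List (List Int)) (h : a ∈ xs) :
    List.idxOf? a xs = some (List.idxOf a xs) := by
  have h1 : (List.idxOf? a xs).isSome := by simpa [List.isSome_idxOf?] using h
  rcases Option.isSome_iff_exists.mp h1 with ⟨k, hk⟩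
  rw [hk, List.idxOf_eq_getD_idxOf?, hk]; rfl

-- the sort in B is the identity: set(tuples) = dedup tuples is already ordered by first occurrence
theorem pvSorted_ofList (tuples : List (List Int)) :
    PySem.List.sorted (PySem.Set.ofList tuples)
      (fun t => (PySem.List.index? tuples t).getD 0) false = PySem.List.dedup tuples := by
  apply PySem.List.sorted_eq_of_perm_of_pairwise_lt
  · rw [PySem.List.dedup_eq_ofList]
  · have hdd : PySem.List.dedup tuples = pvFresh [] tuples := by
      have := pvFresh_nil_eq_dedup tuples []
      simpa [PySem.List.dedup, PySem.Set.ofList] using this.symm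
    rw [hdd]
    refine (pvFresh_pairwise_idxOf tuples []).imp_of_mem ?_
    intro a b ha hb hab
    have hma : a ∈ tuples := (pvMem_pvFresh tuples [] ha).1
    have hmb : b ∈ tuples := (pvMem_pvFresh tuples [] hb).1
    rw [PySem.List.index?_eq_idxOf?, PySem.List.index?_eq_idxOf?,
        pvIdxOf?_eq_some a tuples hma, pvIdxOf?_eq_some b tuples hmb]
    exact hab

-- ===== VERDICT (by name: the statement is the Claim_ definition above) =====
theorem tuple_int_translator_spec : Claim_equal_tuple_int_translator := by
  intro tuples _
  show _ = _
  rw [tuple_int_translator, tuple_int_translator_alt,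
      pvLoop_items tuples PySem.Dict.empty 0 (by simp [pysem])]
  simp only [pvSorted_ofList]
  have hz := pvZip_range_eq_enumerate (PySem.List.dedup tuples) 0
  rw [show (0 : Int) + ((PySem.List.dedup tuples).length : Int)
        = ((PySem.List.dedup tuples).length : Int) by omega] at hz
  rw [hz]
  have h := pvFresh_nil_eq_dedup tuples []
  simp only [List.nil_append] at h
  simp [PySem.Dict.empty, PySem.List.dedup, PySem.Set.ofList, h]
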